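-- pv_equiv track=rewrite | github.com/Organica-Ai-Solutions/NIS_Protocol | routes/bitnet.py | _categorize_training_examples
-- ===== SOURCE A (Python) =====
-- def _categorize_training_examples(examples: list) -> dict:
--     """Categorize training examples by domain"""
--     categories = {
--         "robotics": 0,
--         "can_bus": 0,
--         "physics": 0,
--         "ai_ml": 0,
--         "general": 0
--     }
--
--     robotics_keywords = ["robot", "kinematic", "trajectory", "manipulator", "servo", "actuator"]
--     can_keywords = ["can bus", "can protocol", "ecu", "automotive", "j1939", "canopen"]
--     physics_keywords = ["physics", "force", "energy", "momentum", "newton", "thermodynamic"]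
--     ai_keywords = ["neural", "machine learning", "deep learning", "ai", "model", "training"]
--
--     for ex in examples:
--         prompt_lower = ex.get("prompt", "").lower()
--         if any(kw in prompt_lower for kw in robotics_keywords):
--             categories["robotics"] += 1
--         elif any(kw in prompt_lower for kw in can_keywords):
--             categories["can_bus"] += 1
--         elif any(kw in prompt_lower for kw in physics_keywords):
--             categories["physics"] += 1
--         elif any(kw in prompt_lower for kw in ai_keywords):
--             categories["ai_ml"] += 1
--         else:
--             categories["general"] += 1
--
--     return categories
-- ===== SOURCE B (Python) =====
-- _TABLE = [
--     ("robotics", ["robot", "kinematic", "trajectory", "manipulator", "servo", "actuator"]),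
--     ("can_bus", ["can bus", "can protocol", "ecu", "automotive", "j1939", "canopen"]),
--     ("physics", ["physics", "force", "energy", "momentum", "newton", "thermodynamic"]),
--     ("ai_ml", ["neural", "machine learning", "deep learning", "ai", "model", "training"]),
-- ]
--
--
-- def _categorize_training_examples(examples: list) -> dict:
--     """Categorize training examples by domain (category-major sieve)."""
--     categories = {"robotics": 0, "can_bus": 0, "physics": 0, "ai_ml": 0, "general": 0}
--     remaining = [ex.get("prompt", "").lower() for ex in examples]
--     for cat, kws in _TABLE:
--         matched = [p for p in remaining if any(kw in p for kw in kws)]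
--         remaining = [p for p in remaining if not any(kw in p for kw in kws)]
--         categories[cat] = len(matched)
--     categories["general"] = len(remaining)
--     return categories
-- ===== Notes on version B (the rewrite author's own statement) =====
-- stated objective: alternative
-- what changed: Category-major sieve instead of A's example-major if/elif cascade: B lowers all prompts once into a pool, then for each category in priority order filters the pool into matched (its count) and the unmatched rest, the leftover pool after all four passes being 'general'; no per-example branch cascade and no mutable counter increments.
import Mathlib
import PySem

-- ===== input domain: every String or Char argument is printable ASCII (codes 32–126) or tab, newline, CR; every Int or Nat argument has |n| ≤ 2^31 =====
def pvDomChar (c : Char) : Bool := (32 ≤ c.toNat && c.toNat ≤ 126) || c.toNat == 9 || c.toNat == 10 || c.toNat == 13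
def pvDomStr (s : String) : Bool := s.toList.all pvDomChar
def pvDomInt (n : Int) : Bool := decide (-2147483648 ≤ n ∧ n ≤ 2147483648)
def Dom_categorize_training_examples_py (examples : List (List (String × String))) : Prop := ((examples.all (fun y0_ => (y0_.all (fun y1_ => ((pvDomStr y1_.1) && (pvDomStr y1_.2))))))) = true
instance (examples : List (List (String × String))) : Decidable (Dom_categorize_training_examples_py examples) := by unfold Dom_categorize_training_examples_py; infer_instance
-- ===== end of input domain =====

-- B is a category-major sieve: it lowers all prompts once, then one pass per category in
-- priority order splits the remaining pool into matched (counted) and the rest, the final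
-- leftover being "general" — instead of A's example-major if/elif cascade (objective: alternative).

-- ===== PORT A =====
-- A's loop body as a named step function; the loop is a foldl over the categories dict.
def pvStepA (cats : PySem.Dict String Int) (ex : List (String × String)) : PySem.Dict String Int :=
  let robotics_keywords : List String := ["robot", "kinematic", "trajectory", "manipulator", "servo", "actuator"]
  let can_keywords : List String := ["can bus", "can protocol", "ecu", "automotive", "j1939", "canopen"]
  let physics_keywords : List String := ["physics", "force", "energy", "momentum", "newton", "thermodynamic"]
  let ai_keywords : List String := ["neural", "machine learning", "deep learning", "ai", "model", "training"]
  let prompt_lower := PySem.Str.lower ((PySem.Dict.mk ex).getD "prompt" "")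
  if robotics_keywords.any (fun kw => PySem.Str.isIn kw prompt_lower) then
    cats.modify "robotics" 0 (· + 1)
  else if can_keywords.any (fun kw => PySem.Str.isIn kw prompt_lower) then
    cats.modify "can_bus" 0 (· + 1)
  else if physics_keywords.any (fun kw => PySem.Str.isIn kw prompt_lower) then
    cats.modify "physics" 0 (· + 1)
  else if ai_keywords.any (fun kw => PySem.Str.isIn kw prompt_lower) then
    cats.modify "ai_ml" 0 (· + 1)
  else
    cats.modify "general" 0 (· + 1)

def categorize_training_examples_py (examples : List (List (String × String))) : List (String × Int) :=
  let categories : PySem.Dict String Int :=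
    PySem.Dict.mk [("robotics", 0), ("can_bus", 0), ("physics", 0), ("ai_ml", 0), ("general", 0)]
  (examples.foldl pvStepA categories).items

-- ===== PORT B =====
def pvTable : List (String × List String) :=
  [("robotics", ["robot", "kinematic", "trajectory", "manipulator", "servo", "actuator"]),
   ("can_bus", ["can bus", "can protocol", "ecu", "automotive", "j1939", "canopen"]),
   ("physics", ["physics", "force", "energy", "momentum", "newton", "thermodynamic"]),
   ("ai_ml", ["neural", "machine learning", "deep learning", "ai", "model", "training"])]

-- B's per-category sieve pass: record the matched count, keep the unmatched pool.
def pvSieve (st : PySem.Dict String Int × List String) (cw : String × List String) :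
    PySem.Dict String Int × List String :=
  let matched := st.2.filter (fun p => cw.2.any (fun kw => PySem.Str.isIn kw p))
  let remaining := st.2.filter (fun p => !(cw.2.any (fun kw => PySem.Str.isIn kw p)))
  (st.1.insert cw.1 (matched.length : Int), remaining)

def categorize_training_examples_py_alt (examples : List (List (String × String))) : List (String × Int) :=
  let categories : PySem.Dict String Int :=
    PySem.Dict.mk [("robotics", 0), ("can_bus", 0), ("physics", 0), ("ai_ml", 0), ("general", 0)]
  let remaining : List String :=
    examples.map (fun ex => PySem.Str.lower ((PySem.Dict.mk ex).getD "prompt" ""))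
  let st := pvTable.foldl pvSieve (categories, remaining)
  (st.1.insert "general" (st.2.length : Int)).items

-- ===== PRECONDITION & SPEC =====
def Spec_categorize_training_examples_py (examples : List (List (String × String))) (out : List (String × Int)) : Prop := out = categorize_training_examples_py_alt examples
instance (examples : List (List (String × String))) (out : List (String × Int)) : Decidable (Spec_categorize_training_examples_py examples out) := by unfold Spec_categorize_training_examples_py; infer_instance

-- ===== CLAIM =====
def Claim_equal_categorize_training_examples_py : Prop := ∀ (examples : List (List (String × String))), Dom_categorize_training_examples_py examples → Spec_categorize_training_examples_py examples (categorize_training_examples_py examples)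

-- ===== LEMMAS AND PROOFS =====
def pvMkD (a b c d e : Int) : PySem.Dict String Int :=
  PySem.Dict.mk [("robotics", a), ("can_bus", b), ("physics", c), ("ai_ml", d), ("general", e)]

def pvLow (ex : List (String × String)) : String :=
  PySem.Str.lower ((PySem.Dict.mk ex).getD "prompt" "")

-- A's first-match label of a lowered prompt, phrased via B's priority table.
def pvLbl (p : String) : String :=
  match pvTable.find? (fun cw => cw.2.any (fun kw => PySem.Str.isIn kw p)) with
  | some cw => cw.1
  | none => "general"

-- the four keyword matchers
def pvM1 (p : String) : Bool := (["robot", "kinematic", "trajectory", "manipulator", "servo", "actuator"] : List String).any (fun kw => PySem.Str.isIn kw p)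
def pvM2 (p : String) : Bool := (["can bus", "can protocol", "ecu", "automotive", "j1939", "canopen"] : List String).any (fun kw => PySem.Str.isIn kw p)
def pvM3 (p : String) : Bool := (["physics", "force", "energy", "momentum", "newton", "thermodynamic"] : List String).any (fun kw => PySem.Str.isIn kw p)
def pvM4 (p : String) : Bool := (["neural", "machine learning", "deep learning", "ai", "model", "training"] : List String).any (fun kw => PySem.Str.isIn kw p)

lemma pvBump_rob (a b c d e : Int) :
    PySem.Dict.modify (pvMkD a b c d e) "robotics" 0 (fun x => x + 1) = pvMkD (a + 1) b c d e := rfl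
lemma pvBump_can (a b c d e : Int) :
    PySem.Dict.modify (pvMkD a b c d e) "can_bus" 0 (fun x => x + 1) = pvMkD a (b + 1) c d e := rfl
lemma pvBump_phy (a b c d e : Int) :
    PySem.Dict.modify (pvMkD a b c d e) "physics" 0 (fun x => x + 1) = pvMkD a b (c + 1) d e := rfl
lemma pvBump_ai (a b c d e : Int) :
    PySem.Dict.modify (pvMkD a b c d e) "ai_ml" 0 (fun x => x + 1) = pvMkD a b c (d + 1) e := rfl
lemma pvBump_gen (a b c d e : Int) :
    PySem.Dict.modify (pvMkD a b c d e) "general" 0 (fun x => x + 1) = pvMkD a b c d (e + 1) := rfl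

lemma pvLbl_rob (p : String) (h1 : pvM1 p = true) : pvLbl p = "robotics" := by
  unfold pvLbl pvTable
  have := h1; unfold pvM1 at this
  simp only [List.find?, this]

lemma pvLbl_can (p : String) (h1 : ¬ pvM1 p = true) (h2 : pvM2 p = true) : pvLbl p = "can_bus" := by
  unfold pvLbl pvTable
  have b1 : pvM1 p = false := by simpa using h1
  unfold pvM1 at b1; have := h2; unfold pvM2 at this
  simp only [List.find?, b1, this]

lemma pvLbl_phy (p : String) (h1 : ¬ pvM1 p = true) (h2 : ¬ pvM2 p = true) (h3 : pvM3 p = true) :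
    pvLbl p = "physics" := by
  unfold pvLbl pvTable
  have b1 : pvM1 p = false := by simpa using h1
  have b2 : pvM2 p = false := by simpa using h2
  unfold pvM1 at b1; unfold pvM2 at b2; have := h3; unfold pvM3 at this
  simp only [List.find?, b1, b2, this]

lemma pvLbl_ai (p : String) (h1 : ¬ pvM1 p = true) (h2 : ¬ pvM2 p = true) (h3 : ¬ pvM3 p = true)
    (h4 : pvM4 p = true) : pvLbl p = "ai_ml" := by
  unfold pvLbl pvTable
  have b1 : pvM1 p = false := by simpa using h1
  have b2 : pvM2 p = false := by simpa using h2
  have b3 : pvM3 p = false := by simpa using h3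
  unfold pvM1 at b1; unfold pvM2 at b2; unfold pvM3 at b3; have := h4; unfold pvM4 at this
  simp only [List.find?, b1, b2, b3, this]

lemma pvLbl_gen (p : String) (h1 : ¬ pvM1 p = true) (h2 : ¬ pvM2 p = true) (h3 : ¬ pvM3 p = true)
    (h4 : ¬ pvM4 p = true) : pvLbl p = "general" := by
  unfold pvLbl pvTable
  have b1 : pvM1 p = false := by simpa using h1
  have b2 : pvM2 p = false := by simpa using h2
  have b3 : pvM3 p = false := by simpa using h3
  have b4 : pvM4 p = false := by simpa using h4
  unfold pvM1 at b1; unfold pvM2 at b2; unfold pvM3 at b3; unfold pvM4 at b4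
  simp only [List.find?, b1, b2, b3, b4]

-- A's step bumps exactly the slot named by the label of the lowered prompt.
lemma pvCore (p : String) (a b c d e : Int) :
    (if pvM1 p then PySem.Dict.modify (pvMkD a b c d e) "robotics" 0 (fun x => x + 1)
     else if pvM2 p then PySem.Dict.modify (pvMkD a b c d e) "can_bus" 0 (fun x => x + 1)
     else if pvM3 p then PySem.Dict.modify (pvMkD a b c d e) "physics" 0 (fun x => x + 1)
     else if pvM4 p then PySem.Dict.modify (pvMkD a b c d e) "ai_ml" 0 (fun x => x + 1)
     else PySem.Dict.modify (pvMkD a b c d e) "general" 0 (fun x => x + 1)) =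
    pvMkD (a + if pvLbl p = "robotics" then 1 else 0)
          (b + if pvLbl p = "can_bus" then 1 else 0)
          (c + if pvLbl p = "physics" then 1 else 0)
          (d + if pvLbl p = "ai_ml" then 1 else 0)
          (e + if pvLbl p = "general" then 1 else 0) := by
  by_cases h1 : pvM1 p = true
  · rw [if_pos h1, pvBump_rob, pvLbl_rob p h1]; simp
  · rw [if_neg h1]
    by_cases h2 : pvM2 p = true
    · rw [if_pos h2, pvBump_can, pvLbl_can p h1 h2]; simp
    · rw [if_neg h2]
      by_cases h3 : pvM3 p = true
      · rw [if_pos h3, pvBump_phy, pvLbl_phy p h1 h2 h3]; simp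
      · rw [if_neg h3]
        by_cases h4 : pvM4 p = true
        · rw [if_pos h4, pvBump_ai, pvLbl_ai p h1 h2 h3 h4]; simp
        · rw [if_neg h4, pvBump_gen, pvLbl_gen p h1 h2 h3 h4]; simp

lemma pvStep_label (ex : List (String × String)) (a b c d e : Int) :
    pvStepA (pvMkD a b c d e) ex =
      pvMkD (a + if pvLbl (pvLow ex) = "robotics" then 1 else 0)
            (b + if pvLbl (pvLow ex) = "can_bus" then 1 else 0)
            (c + if pvLbl (pvLow ex) = "physics" then 1 else 0)
            (d + if pvLbl (pvLow ex) = "ai_ml" then 1 else 0)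
            (e + if pvLbl (pvLow ex) = "general" then 1 else 0) :=
  pvCore (pvLow ex) a b c d e

-- A's whole fold counts the labels of the lowered prompts.
lemma pvFold_mkD (exs : List (List (String × String))) :
    ∀ (a b c d e : Int),
      exs.foldl pvStepA (pvMkD a b c d e) =
        pvMkD (a + (((exs.map pvLow).map pvLbl).count "robotics" : Int))
              (b + (((exs.map pvLow).map pvLbl).count "can_bus" : Int))
              (c + (((exs.map pvLow).map pvLbl).count "physics" : Int))
              (d + (((exs.map pvLow).map pvLbl).count "ai_ml" : Int))
              (e + (((exs.map pvLow).map pvLbl).count "general" : Int)) := by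
  induction exs with
  | nil => intro a b c d e; simp
  | cons ex rest ih =>
    intro a b c d e
    simp only [List.foldl_cons, List.map_cons]
    rw [pvStep_label, ih]
    simp only [pvMkD, PySem.Dict.mk.injEq, List.cons.injEq, Prod.mk.injEq, List.count_cons,
               beq_iff_eq, and_true, true_and]
    refine ⟨?_, ?_, ?_, ?_, ?_⟩ <;> (split_ifs with h <;> push_cast <;> omega)

-- B's insert passes on the literal dict
lemma pvIns_rob (a b c d e v : Int) : (pvMkD a b c d e).insert "robotics" v = pvMkD v b c d e := rfl
lemma pvIns_can (a b c d e v : Int) : (pvMkD a b c d e).insert "can_bus" v = pvMkD a v c d e := rfl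
lemma pvIns_phy (a b c d e v : Int) : (pvMkD a b c d e).insert "physics" v = pvMkD a b v d e := rfl
lemma pvIns_ai (a b c d e v : Int) : (pvMkD a b c d e).insert "ai_ml" v = pvMkD a b c v e := rfl
lemma pvIns_gen (a b c d e v : Int) : (pvMkD a b c d e).insert "general" v = pvMkD a b c d v := rfl

-- counting a label over the pool = counting the corresponding matcher combination
lemma pvCount_label (pool : List String) (c : String) (q : String → Bool)
    (h : ∀ p, (pvLbl p = c) ↔ q p = true) :
    ((pool.map pvLbl).count c) = pool.countP q := by
  rw [List.count_eq_countP, List.countP_map]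
  exact List.countP_congr (fun p _ => by simp [Function.comp, h p])

lemma pvPt1 (p : String) : pvLbl p = "robotics" ↔ pvM1 p = true := by
  constructor
  · intro h; by_cases h1 : pvM1 p = true
    · exact h1
    · exfalso
      by_cases h2 : pvM2 p = true
      · rw [pvLbl_can p h1 h2] at h; exact absurd h (by decide)
      · by_cases h3 : pvM3 p = true
        · rw [pvLbl_phy p h1 h2 h3] at h; exact absurd h (by decide)
        · by_cases h4 : pvM4 p = true
          · rw [pvLbl_ai p h1 h2 h3 h4] at h; exact absurd h (by decide)
          · rw [pvLbl_gen p h1 h2 h3 h4] at h; exact absurd h (by decide)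
  · exact pvLbl_rob p

lemma pvPt2 (p : String) : pvLbl p = "can_bus" ↔ (pvM2 p && !pvM1 p) = true := by
  constructor
  · intro h; by_cases h1 : pvM1 p = true
    · rw [pvLbl_rob p h1] at h; exact absurd h (by decide)
    · by_cases h2 : pvM2 p = true
      · simp [h1, h2]
      · exfalso
        by_cases h3 : pvM3 p = true
        · rw [pvLbl_phy p h1 h2 h3] at h; exact absurd h (by decide)
        · by_cases h4 : pvM4 p = true
          · rw [pvLbl_ai p h1 h2 h3 h4] at h; exact absurd h (by decide)
          · rw [pvLbl_gen p h1 h2 h3 h4] at h; exact absurd h (by decide)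
  · intro h
    have h1 : ¬ pvM1 p = true := by simp at h; simp [h.2]
    have h2 : pvM2 p = true := by simp at h; exact h.1
    exact pvLbl_can p h1 h2

lemma pvPt3 (p : String) : pvLbl p = "physics" ↔ (pvM3 p && (!pvM2 p && !pvM1 p)) = true := by
  constructor
  · intro h; by_cases h1 : pvM1 p = true
    · rw [pvLbl_rob p h1] at h; exact absurd h (by decide)
    · by_cases h2 : pvM2 p = true
      · rw [pvLbl_can p h1 h2] at h; exact absurd h (by decide)
      · by_cases h3 : pvM3 p = true
        · simp [h1, h2, h3]
        · exfalso
          by_cases h4 : pvM4 p = true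
          · rw [pvLbl_ai p h1 h2 h3 h4] at h; exact absurd h (by decide)
          · rw [pvLbl_gen p h1 h2 h3 h4] at h; exact absurd h (by decide)
  · intro h
    simp only [Bool.and_eq_true, Bool.not_eq_true'] at h
    exact pvLbl_phy p (by simp [h.2.2]) (by simp [h.2.1]) h.1

lemma pvPt4 (p : String) : pvLbl p = "ai_ml" ↔ (pvM4 p && (!pvM3 p && (!pvM2 p && !pvM1 p))) = true := by
  constructor
  · intro h; by_cases h1 : pvM1 p = true
    · rw [pvLbl_rob p h1] at h; exact absurd h (by decide)
    · by_cases h2 : pvM2 p = true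
      · rw [pvLbl_can p h1 h2] at h; exact absurd h (by decide)
      · by_cases h3 : pvM3 p = true
        · rw [pvLbl_phy p h1 h2 h3] at h; exact absurd h (by decide)
        · by_cases h4 : pvM4 p = true
          · simp [h1, h2, h3, h4]
          · rw [pvLbl_gen p h1 h2 h3 h4] at h; exact absurd h (by decide)
  · intro h
    simp only [Bool.and_eq_true, Bool.not_eq_true'] at h
    exact pvLbl_ai p (by simp [h.2.2.2]) (by simp [h.2.2.1]) (by simp [h.2.1]) h.1

lemma pvPt5 (p : String) : pvLbl p = "general" ↔ (!pvM4 p && (!pvM3 p && (!pvM2 p && !pvM1 p))) = true := by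
  constructor
  · intro h; by_cases h1 : pvM1 p = true
    · rw [pvLbl_rob p h1] at h; exact absurd h (by decide)
    · by_cases h2 : pvM2 p = true
      · rw [pvLbl_can p h1 h2] at h; exact absurd h (by decide)
      · by_cases h3 : pvM3 p = true
        · rw [pvLbl_phy p h1 h2 h3] at h; exact absurd h (by decide)
        · by_cases h4 : pvM4 p = true
          · rw [pvLbl_ai p h1 h2 h3 h4] at h; exact absurd h (by decide)
          · simp [h1, h2, h3, h4]
  · intro h
    simp only [Bool.and_eq_true, Bool.not_eq_true'] at h
    exact pvLbl_gen p (by simp [h.2.2.2]) (by simp [h.2.2.1]) (by simp [h.2.1]) (by simp [h.1])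

-- ===== VERDICT =====
theorem categorize_training_examples_py_spec : Claim_equal_categorize_training_examples_py := by
  intro examples _
  unfold Spec_categorize_training_examples_py
  show categorize_training_examples_py examples = categorize_training_examples_py_alt examples
  unfold categorize_training_examples_py categorize_training_examples_py_alt
  have hA := pvFold_mkD examples 0 0 0 0 0
  show (List.foldl pvStepA (pvMkD 0 0 0 0 0) examples).items =
    (PySem.Dict.insert (pvTable.foldl pvSieve (pvMkD 0 0 0 0 0, examples.map pvLow)).1 "general" _).items
  rw [hA]
  simp only [pvTable, List.foldl_cons, List.foldl_nil, pvSieve]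
  rw [pvIns_rob, pvIns_can, pvIns_phy, pvIns_ai, pvIns_gen]
  simp only [List.filter_filter]
  have key : ∀ (c : String) (q : String → Bool), (∀ p, (pvLbl p = c) ↔ q p = true) →
      ((0 : Int) + (((examples.map pvLow).map pvLbl).count c : Int)) = (((examples.map pvLow).filter q).length : Int) := by
    intro c q h
    rw [zero_add, pvCount_label _ c q h, List.countP_eq_length_filter]
  simp only [pvMkD, List.cons.injEq, Prod.mk.injEq, and_true, true_and]
  refine ⟨?_, ?_, ?_, ?_, ?_⟩
  · exact key "robotics" pvM1 pvPt1
  · exact key "can_bus" (fun p => pvM2 p && !pvM1 p) pvPt2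
  · exact key "physics" (fun p => pvM3 p && (!pvM2 p && !pvM1 p)) pvPt3
  · exact key "ai_ml" (fun p => pvM4 p && (!pvM3 p && (!pvM2 p && !pvM1 p))) pvPt4
  · exact key "general" (fun p => !pvM4 p && (!pvM3 p && (!pvM2 p && !pvM1 p))) pvPt5
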